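-- pv_equiv track=rewrite | github.com/petra66orii/openeire-api | products/pdf_generator.py | _replace_table
-- ===== SOURCE A (Python) =====
-- def _replace_table(markdown_text, new_table_markdown, table_index=0):
--     lines = markdown_text.splitlines()
--     tables = []
--     i = 0
--     while i < len(lines):
--         if lines[i].strip().startswith("|") and i + 1 < len(lines) and lines[i + 1].strip().startswith("|"):
--             start = i
--             i += 2
--             while i < len(lines) and lines[i].strip().startswith("|"):
--                 i += 1
--             tables.append((start, i))
--         else:
--             i += 1
--     if table_index >= len(tables):
--         return markdown_text
--     start, end = tables[table_index]
--     return "\n".join(lines[:start] + [new_table_markdown] + lines[end:])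
-- ===== SOURCE B (Python) =====
-- def _replace_table(markdown_text, new_table_markdown, table_index=0):
--     lines = markdown_text.splitlines()
--     n = len(lines)
--     out = []
--     count = 0
--     replaced = False
--     i = 0
--     while i < n:
--         if lines[i].strip().startswith("|") and i + 1 < n and lines[i + 1].strip().startswith("|"):
--             j = i + 2
--             while j < n and lines[j].strip().startswith("|"):
--                 j += 1
--             if count == table_index:
--                 out.append(new_table_markdown)
--                 replaced = True
--             else:
--                 out.extend(lines[i:j])
--             count += 1
--             i = j
--         else:
--             out.append(lines[i])
--             i += 1
--     if not replaced:
--         return markdown_text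
--     return "\n".join(out)
-- ===== Notes on version B (the rewrite author's own statement) =====
-- stated objective: simpler
-- what changed: B does one fused emit-while-scanning pass with a table counter and a replaced flag, instead of A's collect-all-table-boundaries list followed by indexing and slice-concatenation.
-- outside the precondition, e.g. on _replace_table('|a|\n|b|', 'X', -1): A returns 'X', B returns '|a|\n|b|'; on _replace_table('hi', 'X', -1): A raises IndexError, B returns 'hi'
import Mathlib
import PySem

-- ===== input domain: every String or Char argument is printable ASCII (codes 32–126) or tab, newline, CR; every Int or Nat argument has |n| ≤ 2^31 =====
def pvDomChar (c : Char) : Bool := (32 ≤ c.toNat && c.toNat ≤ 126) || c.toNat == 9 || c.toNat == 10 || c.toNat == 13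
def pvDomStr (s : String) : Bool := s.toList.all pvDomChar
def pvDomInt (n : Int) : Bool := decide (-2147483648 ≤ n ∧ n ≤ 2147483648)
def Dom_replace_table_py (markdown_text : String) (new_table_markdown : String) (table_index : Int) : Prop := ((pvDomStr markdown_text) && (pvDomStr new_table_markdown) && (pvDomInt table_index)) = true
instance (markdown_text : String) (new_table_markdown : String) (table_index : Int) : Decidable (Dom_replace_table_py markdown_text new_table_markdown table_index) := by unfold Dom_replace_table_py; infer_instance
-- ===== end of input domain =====

-- B replaces A's collect-table-boundaries-then-slice with one fused emit-while-scanning pass (simpler decomposition, same cost).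


-- ===== PORT A =====
-- line.strip().startswith("|")  (the same expression appears in both Pythons)
def pvIsBar (s : String) : Bool := PySem.Str.startswith (PySem.Str.strip s) "|"

-- inner 'while i < len(lines) and lines[i].strip().startswith("|"): i += 1' (identical in both Pythons);
-- fuel = len(lines) is a totality device only: the loop advances i once per step and stops at len(lines)
def pvTableEnd (lines : List String) : Nat → Nat → Nat
  | 0, i => i
  | fuel + 1, i =>
      if i < lines.length ∧ pvIsBar (lines.getD i "") then pvTableEnd lines fuel (i + 1) else i

-- A's outer while: collect the (start, end) pairs of every table, in order (fuel is a totality device)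
def pvTablesA (lines : List String) : Nat → Nat → List (Nat × Nat)
  | 0, _ => []
  | fuel + 1, i =>
      if i < lines.length then
        if pvIsBar (lines.getD i "") && decide (i + 1 < lines.length) && pvIsBar (lines.getD (i + 1) "") then
          (i, pvTableEnd lines lines.length (i + 2)) ::
            pvTablesA lines fuel (pvTableEnd lines lines.length (i + 2))
        else
          pvTablesA lines fuel (i + 1)
      else []

def replace_table_py (markdown_text : String) (new_table_markdown : String) (table_index : Int) : String :=
  let lines := PySem.Str.splitlines markdown_text
  let tables := pvTablesA lines lines.length 0
  if (tables.length : Int) ≤ table_index then markdown_text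
  else
    match PySem.List.pyGet? tables table_index with
    | some (s, e) =>
        PySem.Str.join "\n"
          (PySem.List.slice lines none (some (s : Int)) ++ [new_table_markdown] ++
            PySem.List.slice lines (some (e : Int)) none)
    | none => markdown_text   -- tables[table_index] raises IndexError here (negative out-of-range index); excluded by Pre_

-- ===== PORT B =====
-- B's single pass: emit lines, replacing the table whose counter equals table_index; returns (out, replaced)
-- (fuel = len(lines) is a totality device only: i advances every iteration)
def pvLoopB (lines : List String) (new : String) (idx : Int) : Nat → Nat → Nat → List String × Bool
  | 0, _, _ => ([], false)
  | fuel + 1, i, cnt =>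
      if i < lines.length then
        if pvIsBar (lines.getD i "") && decide (i + 1 < lines.length) && pvIsBar (lines.getD (i + 1) "") then
          if (cnt : Int) = idx then
            (new :: (pvLoopB lines new idx fuel (pvTableEnd lines lines.length (i + 2)) (cnt + 1)).1, true)
          else
            (PySem.List.slice lines (some (i : Int)) (some ((pvTableEnd lines lines.length (i + 2)) : Int)) ++
                (pvLoopB lines new idx fuel (pvTableEnd lines lines.length (i + 2)) (cnt + 1)).1,
              (pvLoopB lines new idx fuel (pvTableEnd lines lines.length (i + 2)) (cnt + 1)).2)
        else
          (lines.getD i "" :: (pvLoopB lines new idx fuel (i + 1) cnt).1,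
            (pvLoopB lines new idx fuel (i + 1) cnt).2)
      else ([], false)

def replace_table_py_alt (markdown_text : String) (new_table_markdown : String) (table_index : Int) : String :=
  let lines := PySem.Str.splitlines markdown_text
  let r := pvLoopB lines new_table_markdown table_index lines.length 0 0
  if r.2 then PySem.Str.join "\n" r.1 else markdown_text

-- ===== PRECONDITION & SPEC =====
-- Pre_ excludes negative table_index, on which A applies Python's negative-index wraparound to the tables list:
-- it raises IndexError whenever fewer than |table_index| tables exist (in particular on any table-free text),
-- and on the rare in-range cases it replaces counting from the end — a corner no caller would specify; B treats
-- such an index as 'no such table' and returns the text unchanged.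
def Pre_replace_table_py (markdown_text : String) (new_table_markdown : String) (table_index : Int) : Prop :=
  0 ≤ table_index
instance (markdown_text : String) (new_table_markdown : String) (table_index : Int) : Decidable (Pre_replace_table_py markdown_text new_table_markdown table_index) := by unfold Pre_replace_table_py; infer_instance

def pvWitness_replace_table_py : String × String × Int := ("| a |\n| b |\ntext", "| x |", 0)

def Spec_replace_table_py (markdown_text : String) (new_table_markdown : String) (table_index : Int) (out : String) : Prop := out = replace_table_py_alt markdown_text new_table_markdown table_index
instance (markdown_text : String) (new_table_markdown : String) (table_index : Int) (out : String) : Decidable (Spec_replace_table_py markdown_text new_table_markdown table_index out) := by unfold Spec_replace_table_py; infer_instance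

-- ===== CLAIM (what is proved, stated in full; the proofs are below) =====
def Claim_equal_replace_table_py : Prop := ∀ (markdown_text : String) (new_table_markdown : String) (table_index : Int), Dom_replace_table_py markdown_text new_table_markdown table_index → Pre_replace_table_py markdown_text new_table_markdown table_index → Spec_replace_table_py markdown_text new_table_markdown table_index (replace_table_py markdown_text new_table_markdown table_index)

-- ===== LEMMAS AND PROOFS =====

-- the inner loop never moves i backwards
theorem pvTableEnd_ge (lines : List String) (fuel : Nat) : ∀ i, i ≤ pvTableEnd lines fuel i := by
  induction fuel with
  | zero => intro i; exact Nat.le_refl i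
  | succ n ih =>
      intro i
      rw [pvTableEnd]
      split
      · exact Nat.le_trans (Nat.le_succ i) (ih (i + 1))
      · exact Nat.le_refl i

-- every table start produced from position i lies at or after i
theorem pvTablesA_ge (lines : List String) (fuel : Nat) :
    ∀ i p, p ∈ pvTablesA lines fuel i → i ≤ p.1 := by
  induction fuel with
  | zero => intro i p hp; simp [pvTablesA] at hp
  | succ n ih =>
      intro i p hp
      rw [pvTablesA] at hp
      split at hp
      · split at hp
        · rcases List.mem_cons.1 hp with h1 | h2
          · subst h1; exact Nat.le_refl i
          · have h3 := ih _ p h2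
            have h4 := pvTableEnd_ge lines lines.length (i + 2)
            omega
        · have h3 := ih _ p hp
          omega
      · simp at hp

-- the fused pass, characterised by A's table list (fuel suffices on both sides)
theorem pvLoopB_eq (lines : List String) (new : String) (idx : Int) (fuel : Nat) :
    ∀ i cnt, lines.length - i ≤ fuel →
      pvLoopB lines new idx fuel i cnt =
        match (if (cnt : Int) ≤ idx then (pvTablesA lines fuel i)[(idx - (cnt : Int)).toNat]? else none) with
        | some (s, e) => ((lines.drop i).take (s - i) ++ new :: lines.drop e, true)
        | none => (lines.drop i, false) := by
  induction fuel with
  | zero =>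
      intro i cnt hfuel
      have hd : lines.drop i = [] := List.drop_eq_nil_of_le (by omega)
      by_cases hle : (cnt : Int) ≤ idx <;> simp [pvLoopB, pvTablesA, hd, hle]
  | succ n ih =>
      intro i cnt hfuel
      rw [pvLoopB, pvTablesA]
      split
      · rename_i h
        split
        · rename_i hdet
          have hij : i + 2 ≤ pvTableEnd lines lines.length (i + 2) :=
            pvTableEnd_ge lines lines.length (i + 2)
          have hIH := ih (pvTableEnd lines lines.length (i + 2)) (cnt + 1) (by omega)
          push_cast at hIH
          by_cases hcnt : (cnt : Int) = idx
          · -- this is the table to replace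
            have h0 : (idx - (cnt : Int)).toNat = 0 := by omega
            have hle : (cnt : Int) ≤ idx := le_of_eq hcnt
            rw [if_neg (by omega)] at hIH
            simp only [if_pos hcnt, if_pos hle, h0, hIH, List.getElem?_cons_zero]
            simp only [Nat.sub_self, List.take_zero, List.nil_append]
          · by_cases hle : (cnt : Int) ≤ idx
            · -- skip this table, keep scanning
              have hlt : (cnt : Int) < idx := lt_of_le_of_ne hle hcnt
              rw [if_pos (by omega)] at hIH
              have htoNat : (idx - (cnt : Int)).toNat = (idx - ((cnt : Int) + 1)).toNat + 1 := by omega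
              have hdj : lines.drop (pvTableEnd lines lines.length (i + 2)) =
                  (lines.drop i).drop (pvTableEnd lines lines.length (i + 2) - i) := by
                rw [List.drop_drop]; congr 1; omega
              rw [if_neg hcnt, if_pos hle, htoNat]
              simp only [List.getElem?_cons_succ, PySem.List.slice_natCast]
              cases hget : (pvTablesA lines n (pvTableEnd lines lines.length (i + 2)))[(idx - ((cnt : Int) + 1)).toNat]? with
              | none =>
                  simp only [hget] at hIH
                  simp only [hIH, Prod.mk.injEq]
                  refine ⟨?_, trivial⟩
                  rw [hdj, List.take_append_drop]
              | some p =>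
                  obtain ⟨s, e⟩ := p
                  have hjs : pvTableEnd lines lines.length (i + 2) ≤ s :=
                    pvTablesA_ge lines n _ (s, e) (List.mem_of_getElem? hget)
                  simp only [hget] at hIH
                  simp only [hIH, Prod.mk.injEq]
                  refine ⟨?_, trivial⟩
                  rw [hdj, ← List.append_assoc, ← List.take_add]
                  have hadd : pvTableEnd lines lines.length (i + 2) - i +
                      (s - pvTableEnd lines lines.length (i + 2)) = s - i := by omega
                  rw [hadd]
            · -- counter already past idx: never replaces again
              rw [if_neg (by omega)] at hIH
              rw [if_neg hcnt, if_neg hle]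
              simp only [hIH, Prod.mk.injEq, PySem.List.slice_natCast]
              refine ⟨?_, trivial⟩
              have hdj : lines.drop (pvTableEnd lines lines.length (i + 2)) =
                  (lines.drop i).drop (pvTableEnd lines lines.length (i + 2) - i) := by
                rw [List.drop_drop]; congr 1; omega
              rw [hdj, List.take_append_drop]
        · -- not a table start: emit the line
          rename_i hdet
          have hIH := ih (i + 1) cnt (by omega)
          rw [hIH]
          have hdropi : lines.drop i = lines[i] :: lines.drop (i + 1) :=
            List.drop_eq_getElem_cons h
          have hgetD : lines.getD i "" = lines[i] := List.getD_eq_getElem lines "" h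
          cases hcond : (if (cnt : Int) ≤ idx then (pvTablesA lines n (i + 1))[(idx - (cnt : Int)).toNat]? else none) with
          | none =>
              simp only [hgetD, Prod.mk.injEq]
              exact ⟨hdropi.symm, trivial⟩
          | some p =>
              obtain ⟨s, e⟩ := p
              have hs : i + 1 ≤ s := by
                by_cases hle : (cnt : Int) ≤ idx
                · rw [if_pos hle] at hcond
                  exact pvTablesA_ge lines n _ (s, e) (List.mem_of_getElem? hcond)
                · rw [if_neg hle] at hcond; exact absurd hcond (by simp)
              simp only [hgetD, Prod.mk.injEq]
              refine ⟨?_, trivial⟩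
              rw [hdropi]
              have hti : s - i = (s - (i + 1)) + 1 := by omega
              rw [hti, List.take_succ_cons, List.cons_append]
      · -- i >= len(lines)
        rename_i h
        have hd : lines.drop i = [] := List.drop_eq_nil_of_le (by omega)
        by_cases hle : (cnt : Int) ≤ idx <;> simp [hd, hle]

-- ===== VERDICT (by name: the statement is the Claim_ definition above) =====
theorem replace_table_py_spec : Claim_equal_replace_table_py := by
  intro md new idx _ hpre
  show replace_table_py md new idx = replace_table_py_alt md new idx
  unfold replace_table_py replace_table_py_alt
  have hpre' : (0 : Int) ≤ idx := hpre
  set lines := PySem.Str.splitlines md with hlines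
  have hB := pvLoopB_eq lines new idx lines.length 0 0 (by omega)
  rw [if_pos (by omega : ((0 : Nat) : Int) ≤ idx)] at hB
  have hget : PySem.List.pyGet? (pvTablesA lines lines.length 0) idx = (pvTablesA lines lines.length 0)[idx.toNat]? :=
    PySem.List.pyGet?_of_nonneg _ hpre'
  have h0 : (idx - ((0 : Nat) : Int)).toNat = idx.toNat := by omega
  rw [h0] at hB
  cases hg : (pvTablesA lines lines.length 0)[idx.toNat]? with
  | none =>
      have hlen : ((pvTablesA lines lines.length 0).length : Int) ≤ idx := by
        have := List.getElem?_eq_none_iff.1 hg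
        omega
      rw [hg] at hB
      rw [if_pos hlen]
      simp [hB]
  | some p =>
      obtain ⟨s, e⟩ := p
      have hlt : idx.toNat < (pvTablesA lines lines.length 0).length := by
        by_contra hc
        rw [List.getElem?_eq_none_iff.2 (by omega)] at hg
        exact absurd hg (by simp)
      have hlen : ¬ ((pvTablesA lines lines.length 0).length : Int) ≤ idx := by omega
      rw [hg] at hB
      simp only [if_neg hlen, hget, hg, hB]
      congr 1
      rw [PySem.List.slice_to_natCast, PySem.List.slice_from_natCast]
      simp
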